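-- pv_equiv track=rewrite | github.com/tttturtle-russ/KernelAnalysis | scripts/path/callgraph_to_callchain.py | reverse_paths
-- ===== SOURCE A (Python) =====
-- def reverse_paths(child_to_parents, start_addr):
--     paths = []
--     stack = [([start_addr], start_addr)]
--     while stack:
--         path, node = stack.pop()
--         parents = child_to_parents.get(node, set())
--         if not parents:
--             paths.append(list(reversed(path)))
--         else:
--             for parent in parents:
--                 if parent not in path:
--                     stack.append((path + [parent], parent))
--     return paths
-- ===== SOURCE B (Python) =====
-- def reverse_paths(child_to_parents, start_addr):
--     paths = []
--     def rec(node, path):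
--         parents = child_to_parents.get(node, set())
--         if not parents:
--             paths.append(list(reversed(path)))
--         else:
--             for parent in reversed(list(parents)):
--                 if parent not in path:
--                     rec(parent, path + [parent])
--     rec(start_addr, [start_addr])
--     return paths
-- ===== Notes on version B (the rewrite author's own statement) =====
-- stated objective: simpler
-- what changed: Replaces the explicit worklist stack of (path,node) pairs with a recursive DFS helper that looks up a node's parents and recurses on each parent not already on the path, emitting reversed paths at roots; iterating parents in reversed order reproduces the stack's LIFO emission order exactly.
import Mathlib
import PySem

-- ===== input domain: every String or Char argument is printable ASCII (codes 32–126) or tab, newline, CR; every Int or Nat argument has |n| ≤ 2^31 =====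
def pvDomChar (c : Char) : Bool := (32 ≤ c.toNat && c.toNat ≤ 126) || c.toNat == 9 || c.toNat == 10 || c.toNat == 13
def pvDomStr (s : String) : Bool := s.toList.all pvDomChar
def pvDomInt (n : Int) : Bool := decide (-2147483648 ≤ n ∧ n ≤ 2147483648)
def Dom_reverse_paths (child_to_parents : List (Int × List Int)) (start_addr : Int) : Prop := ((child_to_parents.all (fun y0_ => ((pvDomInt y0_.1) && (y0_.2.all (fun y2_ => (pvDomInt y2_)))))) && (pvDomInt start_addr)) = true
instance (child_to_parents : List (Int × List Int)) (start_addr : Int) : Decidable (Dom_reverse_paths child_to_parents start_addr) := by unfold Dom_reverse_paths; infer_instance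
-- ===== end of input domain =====

-- B rewrites A's explicit worklist-stack loop as a recursive DFS helper (same cost, plainer code).

-- shared lookup primitive: child_to_parents.get(node, set()) (empty default)
def pvGetParents (g : List (Int × List Int)) (node : Int) : List Int :=
  ((PySem.Dict.mk g).get? node).getD []

-- universe of all parent values; used only for fuel / termination measures
def pvU (g : List (Int × List Int)) : List Int := g.flatMap (fun kv => kv.2)

def pvFree (g : List (Int × List Int)) (path : List Int) : Nat :=
  ((pvU g).filter (fun x => decide (x ∉ path))).length

-- the parents list is an infix of the universe (termination support for the ports)
lemma pvGetParents_infix (g : List (Int × List Int)) (node : Int) :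
    (pvGetParents g node).IsInfix (pvU g) := by
  induction g with
  | nil => simp [pvGetParents, pvU, PySem.Dict.get?]
  | cons kv rest ih =>
    cases kv with
    | mk k v =>
      by_cases h : k == node
      · simp [pvGetParents, pvU, PySem.Dict.get?, h]
        exact ⟨[], rest.flatMap (fun kv => kv.2), rfl⟩
      · have h2 : pvGetParents ((k, v) :: rest) node = pvGetParents rest node := by
          simp [pvGetParents, PySem.Dict.get?, h]
        rw [h2]
        have : pvU ((k, v) :: rest) = v ++ pvU rest := by simp [pvU]
        rw [this]
        exact ih.trans (List.suffix_append v (pvU rest)).isInfix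

lemma pv_filter_lt (l path : List Int) (p : Int) (hU : p ∈ l) (hp : p ∉ path) :
    (l.filter (fun x => decide (x ∉ path ++ [p]))).length <
      (l.filter (fun x => decide (x ∉ path))).length := by
  have hmono : ∀ (m : List Int),
      (m.filter (fun x => decide (x ∉ path ++ [p]))).length ≤
        (m.filter (fun x => decide (x ∉ path))).length := by
    intro m
    apply List.Sublist.length_le
    apply List.monotone_filter_right
    intro x hx
    simp only [decide_eq_true_eq] at hx ⊢
    exact fun hmem => hx (List.mem_append_left _ hmem)
  induction l with
  | nil => cases hU
  | cons x xs ih =>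
    rw [List.filter_cons, List.filter_cons]
    rcases List.mem_cons.mp hU with hx | hx
    · subst hx
      have h1 : (decide (p ∉ path ++ [p])) = false := by simp
      have h2 : (decide (p ∉ path)) = true := by simpa using hp
      rw [h1, h2]
      have := hmono xs
      simp only [Bool.false_eq_true, if_false, if_true, List.length_cons]
      omega
    · have hrec := ih hx
      by_cases hxpath : x ∈ path
      · have h1 : (decide (x ∉ path ++ [p])) = false := by
          simp [List.mem_append_left _ hxpath]
        have h2 : (decide (x ∉ path)) = false := by simpa using hxpath
        rw [h1, h2]
        simpa using hrec
      · have h2 : (decide (x ∉ path)) = true := by simpa using hxpath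
        by_cases hxp : x = p
        · have h1 : (decide (x ∉ path ++ [p])) = false := by simp [hxp]
          rw [h1, h2]
          simp only [Bool.false_eq_true, if_false, if_true, List.length_cons]
          omega
        · have h1 : (decide (x ∉ path ++ [p])) = true := by simp [hxpath, hxp]
          rw [h1, h2]
          simp only [if_true, List.length_cons]
          omega

lemma pvFree_lt {g : List (Int × List Int)} {path : List Int} {p : Int}
    (hU : p ∈ pvU g) (hp : p ∉ path) : pvFree g (path ++ [p]) < pvFree g path := by
  unfold pvFree
  exact pv_filter_lt (pvU g) path p hU hp

-- ===== PORT A =====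
-- the while-stack loop of A, fuel-guarded (the fuel below provably never runs out)
def pvLoopA (g : List (Int × List Int)) :
    Nat → List (List Int × Int) → List (List Int) → List (List Int)
  | 0, _, paths => paths
  | _ + 1, [], paths => paths
  | fuel + 1, (path, node) :: rest, paths =>
      let parents := pvGetParents g node
      if parents = [] then
        pvLoopA g fuel rest (paths ++ [path.reverse])
      else
        pvLoopA g fuel
          (parents.foldl (fun st p => if p ∈ path then st else (path ++ [p], p) :: st) rest)
          paths

def reverse_paths (child_to_parents : List (Int × List Int)) (start_addr : Int) : List (List Int) :=
  pvLoopA child_to_parents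
    (((pvU child_to_parents).length + 1) ^ ((pvU child_to_parents).length + 1))
    [([start_addr], start_addr)] []

-- ===== PORT B =====
def pvDfs (g : List (Int × List Int)) (path : List Int) (node : Int) : List (List Int) :=
  let parents := pvGetParents g node
  if parents = [] then [path.reverse]
  else parents.reverse.attach.flatMap (fun q =>
    if h : q.1 ∈ path then [] else pvDfs g (path ++ [q.1]) q.1)
termination_by pvFree g path
decreasing_by
  exact pvFree_lt ((pvGetParents_infix g node).subset (List.mem_reverse.mp q.2)) h

def reverse_paths_alt (child_to_parents : List (Int × List Int)) (start_addr : Int) : List (List Int) :=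
  pvDfs child_to_parents [start_addr] start_addr

-- ===== PRECONDITION & SPEC =====
def Spec_reverse_paths (child_to_parents : List (Int × List Int)) (start_addr : Int) (out : List (List Int)) : Prop := out = reverse_paths_alt child_to_parents start_addr
instance (child_to_parents : List (Int × List Int)) (start_addr : Int) (out : List (List Int)) : Decidable (Spec_reverse_paths child_to_parents start_addr out) := by unfold Spec_reverse_paths; infer_instance

-- ===== CLAIM (what is proved, stated in full; the proofs are below) =====
def Claim_equal_reverse_paths : Prop := ∀ (child_to_parents : List (Int × List Int)) (start_addr : Int), Dom_reverse_paths child_to_parents start_addr → Spec_reverse_paths child_to_parents start_addr (reverse_paths child_to_parents start_addr)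

-- ===== LEMMAS AND PROOFS =====

def pvWt (g : List (Int × List Int)) (path : List Int) : Nat :=
  ((pvU g).length + 1) ^ (pvFree g path + 1)

def pvMeasure (g : List (Int × List Int)) (stack : List (List Int × Int)) : Nat :=
  (stack.map (fun e => pvWt g e.1)).sum

lemma pv_foldl_push (parents path : List Int) (rest : List (List Int × Int)) :
    parents.foldl (fun st p => if p ∈ path then st else (path ++ [p], p) :: st) rest
      = ((parents.filter (fun p => decide (p ∉ path))).reverse.map
          (fun p => (path ++ [p], p))) ++ rest := by
  induction parents generalizing rest with
  | nil => simp
  | cons q qs ih =>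
    by_cases h : q ∈ path
    · simp [List.foldl_cons, h, ih]
    · simp [List.foldl_cons, h, ih]

lemma pv_flatMap_if (l path : List Int) (f : Int → List (List Int)) :
    l.flatMap (fun p => if p ∈ path then [] else f p)
      = (l.filter (fun p => decide (p ∉ path))).flatMap f := by
  induction l with
  | nil => simp
  | cons q qs ih =>
    by_cases h : q ∈ path
    · simp [h, ih]
    · simp [h, ih]

lemma pvDfs_eq (g : List (Int × List Int)) (path : List Int) (node : Int) :
    pvDfs g path node =
      if pvGetParents g node = [] then [path.reverse]
      else ((pvGetParents g node).filter (fun p => decide (p ∉ path))).reverse.flatMap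
        (fun p => pvDfs g (path ++ [p]) p) := by
  rw [pvDfs]
  by_cases h : pvGetParents g node = []
  · simp [h]
  · rw [if_neg h, if_neg h, ← List.filter_reverse, ← pv_flatMap_if]
    simp [List.flatMap_def]

lemma pv_measure_pushed_lt (g : List (Int × List Int)) (path : List Int) (parents : List Int)
    (hinf : parents.IsInfix (pvU g)) :
    pvMeasure g ((parents.filter (fun p => decide (p ∉ path))).reverse.map
        (fun p => (path ++ [p], p))) < pvWt g path := by
  have hn : parents.length ≤ (pvU g).length := hinf.length_le
  have hsum : pvMeasure g ((parents.filter (fun p => decide (p ∉ path))).reverse.map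
        (fun p => (path ++ [p], p)))
      = ((parents.filter (fun p => decide (p ∉ path))).reverse.map
        (fun p => pvWt g (path ++ [p]))).sum := by
    simp only [pvMeasure, List.map_reverse, List.map_map]
    rfl
  rw [hsum]
  have hbound : ∀ x ∈ (parents.filter (fun p => decide (p ∉ path))).reverse.map
        (fun p => pvWt g (path ++ [p])), x ≤ ((pvU g).length + 1) ^ (pvFree g path) := by
    intro x hx
    rcases List.mem_map.mp hx with ⟨p, hpmem, rfl⟩
    have hpmem' := List.mem_reverse.mp hpmem
    have h1 := List.of_mem_filter hpmem'
    have h2 : p ∈ parents := List.mem_of_mem_filter hpmem'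
    have hlt := pvFree_lt (hinf.subset h2) (by simpa using h1)
    unfold pvWt
    apply Nat.pow_le_pow_right (Nat.succ_le_succ (Nat.zero_le _))
    omega
  have hs := List.sum_le_card_nsmul _ _ hbound
  have hlen : ((parents.filter (fun p => decide (p ∉ path))).reverse.map
        (fun p => pvWt g (path ++ [p]))).length ≤ (pvU g).length := by
    simp only [List.length_map, List.length_reverse]
    exact le_trans (List.length_filter_le _ _) hn
  have hpos : 0 < ((pvU g).length + 1) ^ (pvFree g path) :=
    Nat.pow_pos (Nat.succ_pos _)
  unfold pvWt
  have h3 : (((pvU g).length + 1) : Nat) ^ (pvFree g path + 1)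
      = ((pvU g).length + 1) * ((pvU g).length + 1) ^ (pvFree g path) := by
    ring
  rw [h3]
  simp only [smul_eq_mul] at hs
  calc ((parents.filter (fun p => decide (p ∉ path))).reverse.map
        (fun p => pvWt g (path ++ [p]))).sum
      ≤ _ * (((pvU g).length + 1) ^ (pvFree g path)) := hs
    _ ≤ (pvU g).length * (((pvU g).length + 1) ^ (pvFree g path)) :=
        Nat.mul_le_mul_right _ hlen
    _ < ((pvU g).length + 1) * (((pvU g).length + 1) ^ (pvFree g path)) := by
        exact Nat.mul_lt_mul_of_lt_of_le (Nat.lt_succ_self _) (le_refl _) hpos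

lemma pvWt_pos (g : List (Int × List Int)) (path : List Int) : 0 < pvWt g path :=
  Nat.pow_pos (Nat.succ_pos _)

lemma pv_loop_eq (g : List (Int × List Int)) :
    ∀ (fuel : Nat) (stack : List (List Int × Int)) (paths : List (List Int)),
      pvMeasure g stack ≤ fuel →
      pvLoopA g fuel stack paths = paths ++ stack.flatMap (fun e => pvDfs g e.1 e.2) := by
  intro fuel
  induction fuel with
  | zero =>
    intro stack paths h
    cases stack with
    | nil => simp [pvLoopA]
    | cons e rest =>
      exfalso
      have := pvWt_pos g e.1
      simp [pvMeasure] at h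
      omega
  | succ fuel ih =>
    intro stack paths h
    cases stack with
    | nil => simp [pvLoopA]
    | cons e rest =>
      obtain ⟨path, node⟩ := e
      have hmeas : pvMeasure g ((path, node) :: rest) = pvWt g path + pvMeasure g rest := by
        simp [pvMeasure]
      by_cases hp : pvGetParents g node = []
      · rw [pvLoopA]
        simp only [hp, reduceIte]
        have hrest : pvMeasure g rest ≤ fuel := by
          have := pvWt_pos g path
          omega
        have hone : pvDfs g path node = [path.reverse] := by
          rw [pvDfs_eq, if_pos hp]
        rw [ih rest _ hrest]
        simp [hone]
      · rw [pvLoopA]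
        simp only [hp, reduceIte]
        rw [pv_foldl_push]
        have hpush := pv_measure_pushed_lt g path (pvGetParents g node) (pvGetParents_infix g node)
        have hnew : pvMeasure g
            (((pvGetParents g node).filter (fun p => decide (p ∉ path))).reverse.map
              (fun p => (path ++ [p], p)) ++ rest) ≤ fuel := by
          have hadd : ∀ (s t : List (List Int × Int)),
              pvMeasure g (s ++ t) = pvMeasure g s + pvMeasure g t := by
            intro s t; simp [pvMeasure]
          rw [hadd]
          omega
        rw [ih _ _ hnew]
        rw [List.flatMap_append]
        have hone : (((pvGetParents g node).filter (fun p => decide (p ∉ path))).reverse.map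
              (fun p => (path ++ [p], p))).flatMap (fun e => pvDfs g e.1 e.2)
            = pvDfs g path node := by
          rw [pvDfs_eq g path node, if_neg hp]
          rw [List.flatMap_map]
        rw [hone]
        simp

lemma pv_fuel_enough (g : List (Int × List Int)) (s : Int) :
    pvMeasure g [([s], s)] ≤ ((pvU g).length + 1) ^ ((pvU g).length + 1) := by
  have h1 : pvMeasure g [([s], s)] = pvWt g [s] := by simp [pvMeasure]
  rw [h1]
  unfold pvWt
  apply Nat.pow_le_pow_right (Nat.succ_le_succ (Nat.zero_le _))
  have : pvFree g [s] ≤ (pvU g).length := by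
    unfold pvFree
    exact List.length_filter_le _ _
  omega

-- ===== VERDICT (by name: the statement is the Claim_ definition above) =====
theorem reverse_paths_spec : Claim_equal_reverse_paths := by
  intro g s _
  unfold Spec_reverse_paths reverse_paths reverse_paths_alt
  rw [pv_loop_eq g _ _ _ (pv_fuel_enough g s)]
  simp
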